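-- pv_equiv track=rewrite | github.com/avocado-framework/avocado-vt | virttest/utils_test/__init__.py | get_avocadotestlist
-- ===== SOURCE A (Python) =====
-- def get_avocadotestlist(params):
--     """
--     Helper function to parse the params for avocado guest tests
--     and build a testlist to be used by run_avocado{_bg}()
--     :param params:  Test params
--     :return: list of tests used for run_avocado{_bg}()
--     """
--     testlist = []
--     avocadotest = params.get("avocadotest", "")
--     if not avocadotest:
--         return testlist
--     avocadomux = params.get("avocadomux", "")
--     for index, item in enumerate(avocadotest.split(',')):
--         try:
--             mux = ''
--             mux = avocadomux.split(',')[index]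
--         except IndexError:
--             pass
--         testlist.append((item, mux))
--     return testlist
-- ===== SOURCE B (Python) =====
-- def get_avocadotestlist(params):
--     avocadotest = params.get("avocadotest", "")
--     if not avocadotest:
--         return []
--     tests = avocadotest.split(',')
--     muxes = params.get("avocadomux", "").split(',')
--     # Phase 1: pair the common prefix; Phase 2: the leftover tests get ''.
--     paired = list(zip(tests, muxes))
--     return paired + [(t, '') for t in tests[len(muxes):]]
-- ===== Notes on version B (the rewrite author's own statement) =====
-- stated objective: idiomatic
-- what changed: Replaces A's single indexed loop (enumerate + lookup into a re-split mux list guarded by try/except IndexError) with two staged passes: zip pairs the common prefix of the two split lists, then a comprehension appends the leftover tests paired with '', with no index and no exception handling.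
import Mathlib
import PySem

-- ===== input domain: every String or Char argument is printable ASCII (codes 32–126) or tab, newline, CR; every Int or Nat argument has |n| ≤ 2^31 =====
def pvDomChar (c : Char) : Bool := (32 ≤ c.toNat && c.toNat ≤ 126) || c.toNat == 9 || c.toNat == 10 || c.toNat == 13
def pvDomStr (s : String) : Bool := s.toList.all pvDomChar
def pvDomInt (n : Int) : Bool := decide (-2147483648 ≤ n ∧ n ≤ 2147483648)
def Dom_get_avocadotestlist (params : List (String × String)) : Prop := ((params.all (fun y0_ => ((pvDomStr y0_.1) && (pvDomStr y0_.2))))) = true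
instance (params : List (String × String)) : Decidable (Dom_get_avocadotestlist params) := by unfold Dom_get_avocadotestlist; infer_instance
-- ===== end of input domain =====

-- B builds the result in two staged passes — zip on the common prefix of the split
-- lists, then the leftover tests paired with '' — instead of A's enumerate + indexed
-- lookup into a re-split mux list guarded by try/except IndexError (idiomatic).

-- ===== PORT A =====
def get_avocadotestlist (params : List (String × String)) : List (String × String) :=
  let testlist : List (String × String) := []
  let avocadotest := (PySem.Dict.mk params).getD "avocadotest" ""
  if avocadotest = "" then testlist
  else
    let avocadomux := (PySem.Dict.mk params).getD "avocadomux" ""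
    (PySem.List.enumerate ((PySem.Str.split? avocadotest ",").getD [])).foldl
      (fun acc p =>
        let mux := ""
        let mux := match PySem.List.pyGet? ((PySem.Str.split? avocadomux ",").getD []) p.1 with
          | some m => m
          | none => mux      -- except IndexError: pass
        acc ++ [(p.2, mux)])
      testlist

-- ===== PORT B =====
def get_avocadotestlist_alt (params : List (String × String)) : List (String × String) :=
  let avocadotest := (PySem.Dict.mk params).getD "avocadotest" ""
  if avocadotest = "" then []
  else
    let tests := (PySem.Str.split? avocadotest ",").getD []
    let muxes := (PySem.Str.split? ((PySem.Dict.mk params).getD "avocadomux" "") ",").getD []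
    let paired := tests.zip muxes
    paired ++ (tests.drop muxes.length).map (fun t => (t, ""))

-- ===== PRECONDITION & SPEC =====
def Spec_get_avocadotestlist (params : List (String × String)) (out : List (String × String)) : Prop := out = get_avocadotestlist_alt params
instance (params : List (String × String)) (out : List (String × String)) : Decidable (Spec_get_avocadotestlist params out) := by unfold Spec_get_avocadotestlist; infer_instance

-- ===== CLAIM (what is proved, stated in full; the proofs are below) =====
def Claim_equal_get_avocadotestlist : Prop := ∀ (params : List (String × String)), Dom_get_avocadotestlist params → Spec_get_avocadotestlist params (get_avocadotestlist params)

-- ===== LEMMAS AND PROOFS =====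

-- common closed form: pair each test with muxes[n+i] or "" when out of range
def pvPairFrom (muxes : List String) : Nat → List String → List (String × String)
  | _, [] => []
  | n, t :: ts => (t, muxes.getD n "") :: pvPairFrom muxes (n + 1) ts

theorem pvFoldl_eq_pairFrom (muxes : List String) :
    ∀ (ts : List String) (n : Nat) (acc : List (String × String)),
      (PySem.List.enumerate ts (n : Int)).foldl
        (fun acc p =>
          let mux := ""
          let mux := match PySem.List.pyGet? muxes p.1 with
            | some m => m
            | none => mux
          acc ++ [(p.2, mux)]) acc
      = acc ++ pvPairFrom muxes n ts := by
  intro ts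
  induction ts with
  | nil => intro n acc; simp [PySem.List.enumerate_nil, pvPairFrom]
  | cons t ts ih =>
    intro n acc
    rw [PySem.List.enumerate_cons]
    simp only [List.foldl_cons]
    have : ((n : Int) + 1) = ((n + 1 : Nat) : Int) := by push_cast; ring
    rw [this, ih (n + 1)]
    simp only [pvPairFrom, PySem.List.pyGet?_natCast]
    have : (match muxes[n]? with | some m => m | none => "") = muxes.getD n "" := by
      simp [List.getD, Option.getD]
      cases muxes[n]? <;> rfl
    rw [this]
    simp

theorem pvZipStaged_eq_pairFrom (muxes : List String) :
    ∀ (ts : List String) (n : Nat),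
      ts.zip (muxes.drop n) ++ (ts.drop (muxes.drop n).length).map (fun t => (t, ""))
        = pvPairFrom muxes n ts := by
  intro ts
  induction ts with
  | nil => intro n; simp [pvPairFrom]
  | cons t ts ih =>
    intro n
    by_cases hn : n < muxes.length
    · rw [List.drop_eq_getElem_cons hn]
      have hgetD : muxes.getD n "" = muxes[n] := by
        simp [List.getD, List.getElem?_eq_getElem hn]
      simp only [List.zip_cons_cons, List.length_cons, List.drop_succ_cons, List.cons_append,
        pvPairFrom, hgetD, ih (n + 1)]
    · have hdrop : muxes.drop n = [] := List.drop_eq_nil_of_le (by omega)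
      have hdrop2 : muxes.drop (n + 1) = [] := List.drop_eq_nil_of_le (by omega)
      have hih := ih (n + 1)
      rw [hdrop2] at hih
      simp only [hdrop, List.zip_nil_right, List.length_nil, List.drop_zero, List.nil_append,
        List.map_cons, pvPairFrom] at *
      rw [hih]
      congr 1
      simp [List.getD, List.getElem?_eq_none (by omega : muxes.length ≤ n)]

-- ===== VERDICT (by name: the statement is the Claim_ definition above) =====
theorem get_avocadotestlist_spec : Claim_equal_get_avocadotestlist := by
  intro params _
  unfold Spec_get_avocadotestlist get_avocadotestlist get_avocadotestlist_alt
  by_cases h : (PySem.Dict.mk params).getD "avocadotest" "" = ""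
  · simp [h]
  · simp only [if_neg h]
    rw [show (0 : Int) = ((0 : Nat) : Int) from rfl, pvFoldl_eq_pairFrom]
    have hz := pvZipStaged_eq_pairFrom
      ((PySem.Str.split? ((PySem.Dict.mk params).getD "avocadomux" "") ",").getD [])
      ((PySem.Str.split? ((PySem.Dict.mk params).getD "avocadotest" "") ",").getD []) 0
    rw [List.drop_zero] at hz
    rw [hz]
    simp
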